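-- pv_equiv track=rewrite | github.com/pwang867/LeetCode-Solutions-Python | 0843. Guess the Word.py | getDist
-- ===== SOURCE A (Python) =====
-- def getDist(candidates):
--     # return a 2D matrix mat, with dist[i][j] meaning
--     # the num of common words between candidates[i] and candidates[j]
--     n = len(candidates)
--     dists = [[6]*n for _ in range(n)]
--     for i in range(n):
--         for j in range(i+1,n):
--             cnt = 0
--             wordi, wordj = candidates[i], candidates[j]
--             for k in range(len(wordi)):
--                 if wordi[k] == wordj[k]:
--                     cnt += 1
--             dists[i][j] = cnt
--             dists[j][i] = cnt
--     return dists
-- ===== SOURCE B (Python) =====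
-- def getDist(candidates):
--     # Position-grouping: for each character position, bucket word indices by the
--     # letter at that position; every pair sharing a bucket gains one common letter.
--     n = len(candidates)
--     dists = [[6 if i == j else 0 for j in range(n)] for i in range(n)]
--     width = 0
--     for w in candidates:
--         width = max(width, len(w))
--     for k in range(width):
--         buckets = {}
--         for i, w in enumerate(candidates):
--             if k < len(w):
--                 buckets.setdefault(w[k], []).append(i)
--         for idxs in buckets.values():
--             for a in range(len(idxs)):
--                 for b in range(a + 1, len(idxs)):
--                     i, j = idxs[a], idxs[b]
--                     dists[i][j] += 1
--                     dists[j][i] += 1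
--     return dists
-- ===== Notes on version B (the rewrite author's own statement) =====
-- stated objective: alternative
-- what changed: Inverts the traversal: instead of an O(n^2) pairwise scan comparing two words character by character, B walks each character position once, buckets word indices by the letter at that position (a dict per position), and applies a symmetric increment for every pair sharing a bucket, so the per-pair character loop disappears.
import Mathlib
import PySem

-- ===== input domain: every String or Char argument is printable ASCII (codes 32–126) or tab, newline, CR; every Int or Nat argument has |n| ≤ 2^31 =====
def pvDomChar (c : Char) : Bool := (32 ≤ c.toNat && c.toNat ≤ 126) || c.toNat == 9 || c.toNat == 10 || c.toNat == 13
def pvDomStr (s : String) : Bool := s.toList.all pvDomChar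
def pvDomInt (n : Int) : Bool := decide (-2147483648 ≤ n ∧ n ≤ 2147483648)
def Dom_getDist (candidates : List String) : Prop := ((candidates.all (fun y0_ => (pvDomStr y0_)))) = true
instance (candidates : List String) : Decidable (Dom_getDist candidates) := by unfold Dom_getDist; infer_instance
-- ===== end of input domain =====

-- B replaces A's pairwise character-by-character scan by per-position letter buckets
-- (a dict per position; each pair of indices sharing a bucket gets a symmetric increment);
-- equivalence of the return values is proved on every input where A returns (Pre_).


-- ===== PORT A =====
-- literal port of A; the character comparison wordi[k] == wordj[k] is ported as equality of
-- PySem.Str.pyGet? options — exact wherever Python does not raise (Pre_ excludes the IndexError inputs)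
def getDist (candidates : List String) : List (List Int) :=
  let n : Int := candidates.length
  let dists : List (List Int) :=
    (PySem.List.pyRange 0 n 1).map (fun _ => List.replicate candidates.length (6 : Int))
  (PySem.List.pyRange 0 n 1).foldl (fun dists i =>
    (PySem.List.pyRange (i + 1) n 1).foldl (fun dists j =>
      let wordi := PySem.List.pyGetD candidates i ""
      let wordj := PySem.List.pyGetD candidates j ""
      let cnt : Int := (PySem.List.pyRange 0 (PySem.Str.len wordi) 1).foldl
        (fun cnt k =>
          if PySem.Str.pyGet? wordi k = PySem.Str.pyGet? wordj k then cnt + 1 else cnt) 0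
      let dists' := PySem.List.pySetD dists i
        (PySem.List.pySetD (PySem.List.pyGetD dists i []) j cnt)
      PySem.List.pySetD dists' j
        (PySem.List.pySetD (PySem.List.pyGetD dists' j []) i cnt)) dists) dists

-- ===== PORT B =====
-- literal port of Source B: per-position buckets (dict letter -> list of word indices), then a
-- symmetric increment for every pair inside a bucket
def getDist_alt (candidates : List String) : List (List Int) :=
  let n : Int := candidates.length
  let dists : List (List Int) :=
    (PySem.List.pyRange 0 n 1).map (fun i =>
      (PySem.List.pyRange 0 n 1).map (fun j => if i = j then (6 : Int) else 0))
  let width : Int := candidates.foldl (fun m w => max m (PySem.Str.len w)) 0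
  (PySem.List.pyRange 0 width 1).foldl (fun dists k =>
    let buckets : PySem.Dict Char (List Int) :=
      (PySem.List.enumerate candidates 0).foldl (fun d iw =>
        if k < PySem.Str.len iw.2 then
          d.modify (PySem.List.pyGetD iw.2.toList k ' ') [] (fun l => l ++ [iw.1])
        else d) PySem.Dict.empty
    buckets.values.foldl (fun dists idxs =>
      (PySem.List.pyRange 0 (idxs.length : Int) 1).foldl (fun dists a =>
        (PySem.List.pyRange (a + 1) (idxs.length : Int) 1).foldl (fun dists b =>
          let i := PySem.List.pyGetD idxs a 0
          let j := PySem.List.pyGetD idxs b 0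
          let dists' := PySem.List.pySetD dists i
            (PySem.List.pySetD (PySem.List.pyGetD dists i []) j
              (PySem.List.pyGetD (PySem.List.pyGetD dists i []) j 0 + 1))
          PySem.List.pySetD dists' j
            (PySem.List.pySetD (PySem.List.pyGetD dists' j []) i
              (PySem.List.pyGetD (PySem.List.pyGetD dists' j []) i 0 + 1))) dists) dists)
      dists) dists

-- ===== PRECONDITION & SPEC =====
-- Pre_ excludes exactly the inputs on which the Python A raises IndexError (an earlier word
-- strictly longer than a later one, so wordj[k] is read past the end): A returns normally
-- iff the word lengths are nondecreasing.
def Pre_getDist (candidates : List String) : Prop :=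
  List.Pairwise (fun u v => PySem.Str.len u ≤ PySem.Str.len v) candidates
instance (candidates : List String) : Decidable (Pre_getDist candidates) := by
  unfold Pre_getDist; infer_instance
def pvWitness_getDist : List String := ["abcdef", "abcxyz", "zbcxyf"]

-- (On the excluded inputs A raises IndexError while B still returns the matrix of
-- common-letter counts over the overlapping positions.)

def Spec_getDist (candidates : List String) (out : List (List Int)) : Prop :=
  out = getDist_alt candidates
instance (candidates : List String) (out : List (List Int)) : Decidable (Spec_getDist candidates out) := by
  unfold Spec_getDist; infer_instance

-- ===== CLAIM (what is proved, stated in full; the proofs are below) =====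
def Claim_equal_getDist : Prop := ∀ (candidates : List String),
  Dom_getDist candidates → Pre_getDist candidates → Spec_getDist candidates (getDist candidates)

-- ===== LEMMAS AND PROOFS =====
-- Strategy: both loop nests are shown to maintain a functional matrix pvMat n f; A ends at
-- f p q = (p = q ? 6 : pvCnt (min p q) (max p q)) and B at
-- f p q = (p = q ? 6 : count of positions k < width with pvPb), and the two entry values are
-- identified through the prefix-count normalization pvCnt_eq.
def pvMat (n : Nat) (f : Int → Int → Int) : List (List Int) :=
  (List.range n).map (fun (p : Nat) => (List.range n).map (fun (q : Nat) => f (p : Int) (q : Int)))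

theorem pvMat_congr {n : Nat} {f g : Int → Int → Int}
    (h : ∀ p q : Nat, p < n → q < n → f p q = g p q) : pvMat n f = pvMat n g := by
  unfold pvMat
  apply List.ext_getElem (by simp)
  intro p hp hp'
  simp only [List.length_map, List.length_range] at hp
  simp only [List.getElem_map, List.getElem_range]
  apply List.ext_getElem (by simp)
  intro q hq hq'
  simp only [List.length_map, List.length_range] at hq
  simp only [List.getElem_map, List.getElem_range]
  exact h p q hp hq

theorem pvMat_length {n : Nat} {f : Int → Int → Int} : (pvMat n f).length = n := by simp [pvMat]

theorem pvMat_get {n : Nat} {f : Int → Int → Int} {i j : Int}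
    (hi0 : 0 ≤ i) (hin : i < n) (hj0 : 0 ≤ j) (hjn : j < n) :
    PySem.List.pyGetD (PySem.List.pyGetD (pvMat n f) i []) j 0 = f i j := by
  rw [PySem.List.pyGetD_eq_getElem (pvMat n f) [] hi0 (by rw [pvMat_length]; omega)]
  simp only [pvMat, List.getElem_map, List.getElem_range]
  rw [PySem.List.pyGetD_eq_getElem _ 0 hj0 (by simp; omega)]
  simp only [List.getElem_map, List.getElem_range]
  rw [Int.toNat_of_nonneg hi0, Int.toNat_of_nonneg hj0]

theorem pvMat_set {n : Nat} {f : Int → Int → Int} {i j : Int} (v : Int)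
    (hi0 : 0 ≤ i) (hin : i < n) (hj0 : 0 ≤ j) (hjn : j < n) :
    PySem.List.pySetD (pvMat n f) i
      (PySem.List.pySetD (PySem.List.pyGetD (pvMat n f) i []) j v) =
    pvMat n (fun p q => if p = i ∧ q = j then v else f p q) := by
  rw [PySem.List.pyGetD_eq_getElem (pvMat n f) [] hi0 (by rw [pvMat_length]; omega)]
  rw [PySem.List.pySetD_of_nonneg _ _ hj0, PySem.List.pySetD_of_nonneg _ _ hi0]
  simp only [pvMat, List.getElem_map, List.getElem_range]
  apply List.ext_getElem (by simp)
  intro p hp hp'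
  simp only [List.length_set, List.length_map, List.length_range] at hp
  simp only [List.getElem_set, List.getElem_map, List.getElem_range]
  by_cases hpi : i.toNat = p
  · simp only [if_pos hpi]
    apply List.ext_getElem (by simp)
    intro q hq hq'
    simp only [List.length_set, List.length_map, List.length_range] at hq
    simp only [List.getElem_set, List.getElem_map, List.getElem_range]
    by_cases hqj : j.toNat = q
    · rw [if_pos hqj, if_pos ⟨by omega, by omega⟩]
    · rw [if_neg hqj, if_neg (by rintro ⟨_, h2⟩; omega), hpi]
  · simp only [if_neg hpi]
    apply List.ext_getElem (by simp)
    intro q hq hq'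
    simp only [List.length_map, List.length_range] at hq
    simp only [List.getElem_map, List.getElem_range]
    rw [if_neg (by rintro ⟨h1, _⟩; exact hpi (by omega))]

-- ===== A-side =====
def pvCnt (cs : List String) (i j : Int) : Int :=
  (PySem.List.pyRange 0 (PySem.Str.len (PySem.List.pyGetD cs i "")) 1).foldl
    (fun cnt k =>
      if PySem.Str.pyGet? (PySem.List.pyGetD cs i "") k =
         PySem.Str.pyGet? (PySem.List.pyGetD cs j "") k then cnt + 1 else cnt) 0

def pvStepA (cs : List String) (m : List (List Int)) (i j : Int) : List (List Int) :=
  PySem.List.pySetD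
    (PySem.List.pySetD m i (PySem.List.pySetD (PySem.List.pyGetD m i []) j (pvCnt cs i j))) j
    (PySem.List.pySetD
      (PySem.List.pyGetD
        (PySem.List.pySetD m i (PySem.List.pySetD (PySem.List.pyGetD m i []) j (pvCnt cs i j))) j [])
      i (pvCnt cs i j))

theorem getDist_eq (cs : List String) :
    getDist cs = (PySem.List.pyRange 0 (cs.length : Int) 1).foldl (fun m i =>
      (PySem.List.pyRange (i + 1) (cs.length : Int) 1).foldl (fun m j => pvStepA cs m i j) m)
      ((PySem.List.pyRange 0 (cs.length : Int) 1).map (fun _ => List.replicate cs.length (6 : Int))) := by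
  rfl

theorem pvStepA_mat {cs : List String} {n : Nat} {f : Int → Int → Int} {i j : Int}
    (hi0 : 0 ≤ i) (hin : i < n) (hj0 : 0 ≤ j) (hjn : j < n) (hij : i ≠ j) :
    pvStepA cs (pvMat n f) i j =
    pvMat n (fun p q => if (p = i ∧ q = j) ∨ (p = j ∧ q = i) then pvCnt cs i j else f p q) := by
  unfold pvStepA
  rw [pvMat_set _ hi0 hin hj0 hjn]
  rw [pvMat_set _ hj0 hjn hi0 hin]
  apply pvMat_congr
  intro p q hp hq
  by_cases h1 : (p : Int) = j ∧ (q : Int) = i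
  · rw [if_pos h1, if_pos (Or.inr h1)]
  · rw [if_neg h1]
    by_cases h2 : (p : Int) = i ∧ (q : Int) = j
    · rw [if_pos h2, if_pos (Or.inl h2)]
    · rw [if_neg h2, if_neg (by rintro (h | h) <;> [exact h2 h; exact h1 h])]

theorem innerA (cs : List String) (i : Int) (hi0 : 0 ≤ i)
    (d : Nat) : ∀ (j0 : Int) (f : Int → Int → Int), i < j0 →
    ((cs.length : Int) - j0).toNat = d →
    (PySem.List.pyRange j0 (cs.length : Int) 1).foldl (fun m j => pvStepA cs m i j) (pvMat cs.length f) =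
    pvMat cs.length (fun p q =>
      if p = i ∧ j0 ≤ q then pvCnt cs i q
      else if q = i ∧ j0 ≤ p then pvCnt cs i p
      else f p q) := by
  induction d with
  | zero =>
    intro j0 f hij0 hd
    rw [PySem.List.pyRange_one_eq_nil (by omega)]
    simp only [List.foldl_nil]
    apply pvMat_congr
    intro p q hp hq
    rw [if_neg (by rintro ⟨_, h⟩; omega), if_neg (by rintro ⟨_, h⟩; omega)]
  | succ d ih =>
    intro j0 f hij0 hd
    rw [PySem.List.pyRange_one_cons (by omega)]
    simp only [List.foldl_cons]
    rw [pvStepA_mat hi0 (by omega) (by omega) (by omega) (by omega)]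
    rw [ih (j0 + 1) _ (by omega) (by omega)]
    apply pvMat_congr
    intro p q hp hq
    by_cases h1 : (p : Int) = i ∧ j0 ≤ (q : Int)
    · rw [if_pos h1]
      by_cases h1' : (p : Int) = i ∧ j0 + 1 ≤ (q : Int)
      · rw [if_pos h1']
      · -- q = j0 case
        have hq0 : (q : Int) = j0 := by omega
        rw [if_neg h1', if_neg (by rintro ⟨hqi, _⟩; omega),
            if_pos (Or.inl ⟨h1.1, hq0⟩), hq0]
    · rw [if_neg h1]
      by_cases h2 : (q : Int) = i ∧ j0 ≤ (p : Int)
      · rw [if_pos h2]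
        by_cases h2' : (q : Int) = i ∧ j0 + 1 ≤ (p : Int)
        · rw [if_neg (by rintro ⟨hpi, _⟩; omega), if_pos h2']
        · have hp0 : (p : Int) = j0 := by omega
          rw [if_neg (by rintro ⟨hpi, _⟩; omega), if_neg h2',
              if_pos (Or.inr ⟨hp0, h2.1⟩), hp0]
      · rw [if_neg (by rintro ⟨hpi, hj⟩; exact h1 ⟨hpi, by omega⟩),
            if_neg (by rintro ⟨hqi, hj⟩; exact h2 ⟨hqi, by omega⟩),
            if_neg (by rintro (⟨hpi, hqj⟩ | ⟨hpj, hqi⟩) <;> [exact h1 ⟨hpi, by omega⟩; exact h2 ⟨hqi, by omega⟩]),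
            if_neg h2]

theorem outerA (cs : List String) (d : Nat) : ∀ (i0 : Int) (f : Int → Int → Int), 0 ≤ i0 →
    ((cs.length : Int) - i0).toNat = d →
    (PySem.List.pyRange i0 (cs.length : Int) 1).foldl (fun m i =>
      (PySem.List.pyRange (i + 1) (cs.length : Int) 1).foldl (fun m j => pvStepA cs m i j) m)
      (pvMat cs.length f) =
    pvMat cs.length (fun p q =>
      if p ≠ q ∧ i0 ≤ min p q then pvCnt cs (min p q) (max p q) else f p q) := by
  induction d with
  | zero =>
    intro i0 f hi0 hd
    rw [PySem.List.pyRange_one_eq_nil (by omega)]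
    simp only [List.foldl_nil]
    apply pvMat_congr
    intro p q hp hq
    rw [if_neg (by rintro ⟨_, h⟩; simp only [le_min_iff] at h; omega)]
  | succ d ih =>
    intro i0 f hi0 hd
    rw [PySem.List.pyRange_one_cons (by omega)]
    simp only [List.foldl_cons]
    rw [innerA cs i0 hi0 d (i0 + 1) f (by omega) (by omega)]
    rw [ih (i0 + 1) _ (by omega) (by omega)]
    apply pvMat_congr
    intro p q hp hq
    by_cases h1 : (p : Int) ≠ (q : Int) ∧ i0 + 1 ≤ min (p : Int) (q : Int)
    · rw [if_pos h1, if_pos ⟨h1.1, by have := h1.2; simp only [le_min_iff] at *; omega⟩]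
    · rw [if_neg h1]
      by_cases h2 : (p : Int) ≠ (q : Int) ∧ i0 ≤ min (p : Int) (q : Int)
      · rw [if_pos h2]
        -- min p q = i0
        have hmin : min (p : Int) (q : Int) = i0 := by
          rcases h2 with ⟨hne, hle⟩
          simp only [le_min_iff] at hle
          by_contra hc
          exact h1 ⟨hne, by simp only [le_min_iff]; constructor <;> omega⟩
        by_cases hpi : (p : Int) = i0
        · have hq1 : i0 + 1 ≤ (q : Int) := by
            rcases h2 with ⟨hne, hle⟩; simp only [le_min_iff] at hle; omega
          rw [if_pos ⟨hpi, hq1⟩]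
          have h3 : min (p : Int) (q : Int) = (p : Int) := by omega
          have h4 : max (p : Int) (q : Int) = (q : Int) := by omega
          rw [h3, h4, hpi]
        · have hqi : (q : Int) = i0 := by omega
          have hp1 : i0 + 1 ≤ (p : Int) := by
            rcases h2 with ⟨hne, hle⟩; simp only [le_min_iff] at hle; omega
          rw [if_neg (by rintro ⟨h, _⟩; exact hpi h), if_pos ⟨hqi, hp1⟩]
          have h3 : min (p : Int) (q : Int) = (q : Int) := by omega
          have h4 : max (p : Int) (q : Int) = (p : Int) := by omega
          rw [h3, h4, hqi]
      · rw [if_neg (by rintro ⟨hpi, hq1⟩; exact h2 ⟨by omega, by simp only [le_min_iff]; omega⟩),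
            if_neg (by rintro ⟨hqi, hp1⟩; exact h2 ⟨by omega, by simp only [le_min_iff]; omega⟩),
            if_neg h2]

theorem initA (cs : List String) :
    (PySem.List.pyRange 0 (cs.length : Int) 1).map (fun _ => List.replicate cs.length (6 : Int)) =
    pvMat cs.length (fun _ _ => 6) := by
  rw [PySem.List.pyRange_zero_nat]
  simp [pvMat, List.map_map, Function.comp_def, List.map_const']

theorem getDist_mat (cs : List String) :
    getDist cs = pvMat cs.length (fun p q =>
      if p = q then 6 else pvCnt cs (min p q) (max p q)) := by
  rw [getDist_eq, initA, outerA cs ((cs.length : Int) - 0).toNat 0 _ le_rfl rfl]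
  apply pvMat_congr
  intro p q hp hq
  by_cases h : (p : Int) = (q : Int)
  · rw [if_neg (by rintro ⟨hne, _⟩; exact hne h), if_pos h]
  · rw [if_pos ⟨h, by simp only [le_min_iff]; omega⟩, if_neg h]

def pvRow1 (m : List (List Int)) (i j : Int) : List (List Int) :=
  PySem.List.pySetD m i
    (PySem.List.pySetD (PySem.List.pyGetD m i []) j
      (PySem.List.pyGetD (PySem.List.pyGetD m i []) j 0 + 1))

def pvStepB (m : List (List Int)) (i j : Int) : List (List Int) :=
  PySem.List.pySetD (pvRow1 m i j) j
    (PySem.List.pySetD (PySem.List.pyGetD (pvRow1 m i j) j [])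
      i (PySem.List.pyGetD (PySem.List.pyGetD (pvRow1 m i j) j []) i 0 + 1))

theorem pvStepB_mat {n : Nat} {f : Int → Int → Int} {i j : Int}
    (hi0 : 0 ≤ i) (hin : i < n) (hj0 : 0 ≤ j) (hjn : j < n) (hij : i ≠ j) :
    pvStepB (pvMat n f) i j =
    pvMat n (fun p q => if (p = i ∧ q = j) ∨ (p = j ∧ q = i) then f p q + 1 else f p q) := by
  unfold pvStepB pvRow1
  rw [pvMat_get hi0 hin hj0 hjn, pvMat_set _ hi0 hin hj0 hjn,
      pvMat_get hj0 hjn hi0 hin, pvMat_set _ hj0 hjn hi0 hin]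
  rw [if_neg (by rintro ⟨h1, h2⟩; exact hij h2)]
  apply pvMat_congr
  intro p q hp hq
  by_cases h1 : (p : Int) = j ∧ (q : Int) = i
  · rw [if_pos h1, if_pos (Or.inr h1), h1.1, h1.2]
  · rw [if_neg h1]
    by_cases h2 : (p : Int) = i ∧ (q : Int) = j
    · rw [if_pos h2, if_pos (Or.inl h2), h2.1, h2.2]
    · rw [if_neg h2, if_neg (by rintro (h | h) <;> [exact h2 h; exact h1 h])]

theorem pvNotMemDrop {α : Type} {l : List α} (hnd : l.Nodup) {a b : Nat}
    (ha : a < l.length) (hab : a < b) : l[a] ∉ l.drop b := by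
  intro hmem
  obtain ⟨k, hk, hkeq⟩ := List.mem_iff_getElem.mp hmem
  rw [List.getElem_drop] at hkeq
  have : b + k = a := (List.Nodup.getElem_inj_iff hnd).mp hkeq
  omega

theorem pvBucketInner {n : Nat} {idxs : List Int} (hnd : idxs.Nodup)
    (hmem : ∀ x ∈ idxs, 0 ≤ x ∧ x < n) {a : Int} (ha0 : 0 ≤ a) (ha : a < idxs.length)
    (d : Nat) : ∀ (b0 : Int) (f : Int → Int → Int), a < b0 →
    ((idxs.length : Int) - b0).toNat = d →
    (PySem.List.pyRange b0 (idxs.length : Int) 1).foldl (fun m b =>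
      pvStepB m (PySem.List.pyGetD idxs a 0) (PySem.List.pyGetD idxs b 0)) (pvMat n f) =
    pvMat n (fun p q =>
      if (p = PySem.List.pyGetD idxs a 0 ∧ q ∈ idxs.drop b0.toNat) ∨
         (q = PySem.List.pyGetD idxs a 0 ∧ p ∈ idxs.drop b0.toNat)
      then f p q + 1 else f p q) := by
  have haN : a.toNat < idxs.length := by omega
  have hIa : PySem.List.pyGetD idxs a 0 = idxs[a.toNat] := by
    rw [PySem.List.pyGetD_eq_getElem idxs 0 (by omega) (by omega)]
  induction d with
  | zero =>
    intro b0 f hab hd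
    rw [PySem.List.pyRange_one_eq_nil (by omega)]
    have hdrop : idxs.drop b0.toNat = [] := List.drop_eq_nil_of_le (by omega)
    simp only [List.foldl_nil, hdrop]
    apply pvMat_congr
    intro p q hp hq
    rw [if_neg (by rintro (⟨_, h⟩ | ⟨_, h⟩) <;> exact (List.not_mem_nil) h)]
  | succ d ih =>
    intro b0 f hab hd
    have hb0' : b0.toNat < idxs.length := by omega
    rw [PySem.List.pyRange_one_cons (by omega)]
    simp only [List.foldl_cons]
    have hIb : PySem.List.pyGetD idxs b0 0 = idxs[b0.toNat] := by
      rw [PySem.List.pyGetD_eq_getElem idxs 0 (by omega) (by omega)]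
    have hane : idxs[a.toNat] ≠ idxs[b0.toNat] := by
      intro h
      have := (List.Nodup.getElem_inj_iff hnd).mp h
      omega
    rw [hIb]
    rw [hIa]
    rw [pvStepB_mat (hmem _ (List.getElem_mem _)).1 (hmem _ (List.getElem_mem _)).2
        (hmem _ (List.getElem_mem _)).1 (hmem _ (List.getElem_mem _)).2 hane]
    rw [← hIa]
    rw [ih (b0 + 1) _ (by omega) (by omega)]
    have hdropc : idxs.drop b0.toNat = idxs[b0.toNat] :: idxs.drop (b0 + 1).toNat := by
      rw [List.drop_eq_getElem_cons hb0']
      congr 2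
      omega
    have hInotin : idxs[a.toNat] ∉ idxs.drop (b0 + 1).toNat := pvNotMemDrop hnd haN (by omega)
    have hBnotin : idxs[b0.toNat] ∉ idxs.drop (b0 + 1).toNat := pvNotMemDrop hnd hb0' (by omega)
    apply pvMat_congr
    intro p q hp hq
    rw [hdropc, hIa]
    set I := idxs[a.toNat] with hI
    set J := idxs[b0.toNat] with hJ
    set D := idxs.drop (b0 + 1).toNat with hD
    by_cases h1 : ((p : Int) = I ∧ (q : Int) ∈ D) ∨ ((q : Int) = I ∧ (p : Int) ∈ D)
    · rw [if_pos h1]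
      rcases h1 with ⟨hpI, hqD⟩ | ⟨hqI, hpD⟩
      · rw [if_neg (by
            rintro (⟨h2, h3⟩ | ⟨h2, h3⟩)
            · exact hBnotin (h3 ▸ hqD)
            · exact hane (hpI.symm.trans h2)),
          if_pos (Or.inl ⟨hpI, List.mem_cons_of_mem _ hqD⟩)]
      · rw [if_neg (by
            rintro (⟨h2, h3⟩ | ⟨h2, h3⟩)
            · exact hane (hqI.symm.trans h3)
            · exact hBnotin (h2 ▸ hpD)),
          if_pos (Or.inr ⟨hqI, List.mem_cons_of_mem _ hpD⟩)]
    · rw [if_neg h1]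
      by_cases h2 : ((p : Int) = I ∧ (q : Int) = J) ∨ ((p : Int) = J ∧ (q : Int) = I)
      · rw [if_pos h2]
        rcases h2 with ⟨hpI, hqJ⟩ | ⟨hpJ, hqI⟩
        · rw [if_pos (Or.inl ⟨hpI, hqJ ▸ List.mem_cons_self⟩)]
        · rw [if_pos (Or.inr ⟨hqI, hpJ ▸ List.mem_cons_self⟩)]
      · rw [if_neg h2, if_neg (by
          rintro (⟨hpI, hqM⟩ | ⟨hqI, hpM⟩)
          · rcases List.mem_cons.mp hqM with hqJ | hqD
            · exact h2 (Or.inl ⟨hpI, hqJ⟩)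
            · exact h1 (Or.inl ⟨hpI, hqD⟩)
          · rcases List.mem_cons.mp hpM with hpJ | hpD
            · exact h2 (Or.inr ⟨hpJ, hqI⟩)
            · exact h1 (Or.inr ⟨hqI, hpD⟩))]

theorem pvBucketOuter {n : Nat} {idxs : List Int} (hnd : idxs.Nodup)
    (hmem : ∀ x ∈ idxs, 0 ≤ x ∧ x < n)
    (d : Nat) : ∀ (a0 : Int) (f : Int → Int → Int), 0 ≤ a0 →
    ((idxs.length : Int) - a0).toNat = d →
    (PySem.List.pyRange a0 (idxs.length : Int) 1).foldl (fun m a =>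
      (PySem.List.pyRange (a + 1) (idxs.length : Int) 1).foldl (fun m b =>
        pvStepB m (PySem.List.pyGetD idxs a 0) (PySem.List.pyGetD idxs b 0)) m) (pvMat n f) =
    pvMat n (fun p q =>
      if p ≠ q ∧ p ∈ idxs.drop a0.toNat ∧ q ∈ idxs.drop a0.toNat
      then f p q + 1 else f p q) := by
  induction d with
  | zero =>
    intro a0 f ha0 hd
    rw [PySem.List.pyRange_one_eq_nil (by omega)]
    have hdrop : idxs.drop a0.toNat = [] := List.drop_eq_nil_of_le (by omega)
    simp only [List.foldl_nil, hdrop]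
    apply pvMat_congr
    intro p q hp hq
    rw [if_neg (by rintro ⟨_, h, _⟩; exact (List.not_mem_nil) h)]
  | succ d ih =>
    intro a0 f ha0 hd
    have ha0' : a0.toNat < idxs.length := by omega
    rw [PySem.List.pyRange_one_cons (by omega)]
    simp only [List.foldl_cons]
    rw [pvBucketInner hnd hmem ha0 (by omega) ((idxs.length : Int) - (a0 + 1)).toNat (a0 + 1) f
        (by omega) rfl]
    rw [ih (a0 + 1) _ (by omega) (by omega)]
    have hIa : PySem.List.pyGetD idxs a0 0 = idxs[a0.toNat] := by
      rw [PySem.List.pyGetD_eq_getElem idxs 0 (by omega) (by omega)]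
    have hdropc : idxs.drop a0.toNat = idxs[a0.toNat] :: idxs.drop (a0 + 1).toNat := by
      rw [List.drop_eq_getElem_cons ha0']
      congr 2
      omega
    have hInotin : idxs[a0.toNat] ∉ idxs.drop (a0 + 1).toNat := pvNotMemDrop hnd ha0' (by omega)
    apply pvMat_congr
    intro p q hp hq
    rw [hdropc, hIa]
    set I := idxs[a0.toNat] with hI
    set D := idxs.drop (a0 + 1).toNat with hD
    by_cases h1 : (p : Int) ≠ (q : Int) ∧ (p : Int) ∈ I :: D ∧ (q : Int) ∈ I :: D
    · rw [if_pos h1]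
      obtain ⟨hne, hpM, hqM⟩ := h1
      rcases List.mem_cons.mp hpM with hpI | hpD
      · rcases List.mem_cons.mp hqM with hqI | hqD
        · exact absurd (hpI.trans hqI.symm) hne
        · rw [if_neg (by rintro ⟨_, hpD', _⟩; exact hInotin (hpI ▸ hpD')),
              if_pos (Or.inl ⟨hpI, hqD⟩)]
      · rcases List.mem_cons.mp hqM with hqI | hqD
        · rw [if_neg (by rintro ⟨_, _, hqD'⟩; exact hInotin (hqI ▸ hqD')),
              if_pos (Or.inr ⟨hqI, hpD⟩)]
        · rw [if_pos ⟨hne, hpD, hqD⟩,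
              if_neg (by rintro (⟨hpI, _⟩ | ⟨hqI, _⟩) <;> [exact hInotin (hpI ▸ hpD); exact hInotin (hqI ▸ hqD)])]
    · rw [if_neg h1]
      have hne1 : ¬ (((p : Int) = I ∧ (q : Int) ∈ D) ∨ ((q : Int) = I ∧ (p : Int) ∈ D)) := by
        rintro (⟨hpI, hqD⟩ | ⟨hqI, hpD⟩)
        · exact h1 ⟨by rintro h; exact hInotin ((hpI.symm.trans h).symm ▸ hqD), hpI ▸ List.mem_cons_self, List.mem_cons_of_mem _ hqD⟩
        · exact h1 ⟨by rintro h; exact hInotin ((h.trans hqI) ▸ hpD), List.mem_cons_of_mem _ hpD, hqI ▸ List.mem_cons_self⟩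
      have hne2 : ¬ ((p : Int) ≠ (q : Int) ∧ (p : Int) ∈ D ∧ (q : Int) ∈ D) := by
        rintro ⟨hne, hpD, hqD⟩
        exact h1 ⟨hne, List.mem_cons_of_mem _ hpD, List.mem_cons_of_mem _ hqD⟩
      rw [if_neg hne2, if_neg hne1]

def pvBucketLoop (m : List (List Int)) (idxs : List Int) : List (List Int) :=
  (PySem.List.pyRange 0 (idxs.length : Int) 1).foldl (fun dists a =>
    (PySem.List.pyRange (a + 1) (idxs.length : Int) 1).foldl (fun dists b =>
      pvStepB dists (PySem.List.pyGetD idxs a 0) (PySem.List.pyGetD idxs b 0)) dists) m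

theorem pvBucketLoop_mat {n : Nat} {idxs : List Int} (hnd : idxs.Nodup)
    (hmem : ∀ x ∈ idxs, 0 ≤ x ∧ x < n) (f : Int → Int → Int) :
    pvBucketLoop (pvMat n f) idxs =
    pvMat n (fun p q => if p ≠ q ∧ p ∈ idxs ∧ q ∈ idxs then f p q + 1 else f p q) := by
  unfold pvBucketLoop
  rw [pvBucketOuter hnd hmem ((idxs.length : Int) - 0).toNat 0 f le_rfl rfl]
  norm_num
  rfl

theorem pvBucketsFold {n : Nat} (B : List (List Int))
    (h : ∀ b ∈ B, b.Nodup ∧ ∀ x ∈ b, 0 ≤ x ∧ x < n) :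
    ∀ (f : Int → Int → Int),
    B.foldl pvBucketLoop (pvMat n f) =
    pvMat n (fun p q => if p = q then f p q
      else f p q + (B.countP (fun b => decide ((p ∈ b) ∧ (q ∈ b))) : Int)) := by
  induction B with
  | nil =>
    intro f
    simp only [List.foldl_nil, List.countP_nil]
    apply pvMat_congr
    intro p q hp hq
    by_cases hpq : (p : Int) = (q : Int)
    · rw [if_pos hpq]
    · rw [if_neg hpq]; push_cast; ring
  | cons b B ih =>
    intro f
    simp only [List.foldl_cons]
    rw [pvBucketLoop_mat (h b List.mem_cons_self).1 (h b List.mem_cons_self).2 f]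
    rw [ih (fun b hb => h b (List.mem_cons_of_mem _ hb)) _]
    apply pvMat_congr
    intro p q hp hq
    by_cases hpq : (p : Int) = (q : Int)
    · rw [if_pos hpq, if_pos hpq, if_neg (by rintro ⟨hne, _⟩; exact hne hpq)]
    · rw [if_neg hpq, if_neg hpq, List.countP_cons]
      by_cases hb : (p : Int) ∈ b ∧ (q : Int) ∈ b
      · rw [if_pos ⟨hpq, hb.1, hb.2⟩, if_pos (by simpa using hb)]
        push_cast; ring
      · rw [if_neg (by rintro ⟨_, h1, h2⟩; exact hb ⟨h1, h2⟩), if_neg (by simpa using hb)]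
        push_cast; ring

-- ===== the per-position bucket dict =====
def pvWord (cs : List String) (i : Int) : List Char :=
  (PySem.List.pyGetD cs i "").toList

def pvKey (cs : List String) (k : Int) (iw : Int × String) : Char :=
  PySem.List.pyGetD iw.2.toList k ' '

def pvBuckets (cs : List String) (k : Int) : PySem.Dict Char (List Int) :=
  (PySem.List.enumerate cs 0).foldl (fun d iw =>
    if k < PySem.Str.len iw.2 then
      d.modify (PySem.List.pyGetD iw.2.toList k ' ') [] (fun l => l ++ [iw.1])
    else d) PySem.Dict.empty

def pvLk (cs : List String) (k : Int) : List (Int × String) :=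
  (PySem.List.enumerate cs 0).filter (fun iw => decide (k < PySem.Str.len iw.2))

theorem pvBuckets_eq_filter (cs : List String) (k : Int) :
    pvBuckets cs k =
    (pvLk cs k).foldl (fun d iw =>
      d.modify (pvKey cs k iw) [] (fun l => l ++ [iw.1])) PySem.Dict.empty := by
  unfold pvBuckets pvLk pvKey
  rw [List.foldl_filter]
  congr 1
  funext d iw
  by_cases h : k < PySem.Str.len iw.2
  · rw [if_pos h, if_pos (by simpa using h)]
  · rw [if_neg h, if_neg (by simpa using h)]

theorem pvBuckets_keys (cs : List String) (k : Int) :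
    (pvBuckets cs k).keys = PySem.Set.ofList ((pvLk cs k).map (pvKey cs k)) := by
  rw [pvBuckets_eq_filter]
  rw [PySem.Dict.keys_foldl_modify_key (pvLk cs k) (pvKey cs k) [] (fun _ iw => fun l => l ++ [iw.1])]
  rw [PySem.Dict.keys_empty, PySem.Set.update_nil_left]

theorem pvBuckets_keys_nodup (cs : List String) (k : Int) : (pvBuckets cs k).keys.Nodup := by
  rw [pvBuckets_keys]
  exact PySem.Set.nodup_ofList _

def pvBucket (cs : List String) (k : Int) (c : Char) : List Int :=
  ((PySem.List.pyRange 0 (cs.length : Int) 1).filter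
    (fun j => decide (k < PySem.Str.len (PySem.List.pyGetD cs j "")) &&
      (PySem.List.pyGetD (PySem.List.pyGetD cs j "").toList k ' ' == c)))

theorem pvBuckets_getD (cs : List String) (k : Int) (c : Char) :
    (pvBuckets cs k).getD c [] = pvBucket cs k c := by
  rw [pvBuckets_eq_filter]
  rw [show (fun (d : PySem.Dict Char (List Int)) (iw : Int × String) =>
        d.modify (pvKey cs k iw) [] (fun l => l ++ [iw.1])) =
      (fun d iw => d.modify ((fun (p : Char × Int) => p.1) (pvKey cs k iw, iw.1)) []
        (fun l => l ++ [((fun (p : Char × Int) => p.2) (pvKey cs k iw, iw.1))])) from rfl]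
  rw [← List.foldl_map (f := fun iw => (pvKey cs k iw, iw.1))
      (g := fun (d : PySem.Dict Char (List Int)) (p : Char × Int) =>
        d.modify p.1 [] (fun l => l ++ [p.2]))]
  rw [PySem.Dict.getD_foldl_modify_append]
  rw [List.filter_map, List.map_map]
  simp only [PySem.Dict.getD_empty, List.nil_append]
  unfold pvLk pvBucket pvKey
  rw [PySem.List.enumerate_eq_map_pyRange cs ""]
  rw [List.filter_map, List.filter_map, List.map_map, List.filter_filter]
  simp only [Function.comp_def, PySem.List.len]
  rw [List.map_id']
  exact List.filter_congr (fun j _ => Bool.and_comm _ _)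

def pvPb (u v : List Char) (k : Nat) : Bool :=
  decide (k < u.length) && decide (k < v.length) && decide (u[k]? = v[k]?)

theorem pvBuckets_values (cs : List String) (k : Int) :
    (pvBuckets cs k).values = (pvBuckets cs k).keys.map (fun c => pvBucket cs k c) := by
  rw [PySem.Dict.values_eq_map_keys _ (pvBuckets_keys_nodup cs k) []]
  exact List.map_congr_left (fun c _ => pvBuckets_getD cs k c)

theorem pvBucket_nodup (cs : List String) (k : Int) (c : Char) : (pvBucket cs k c).Nodup :=
  List.Nodup.filter _ (PySem.List.nodup_pyRange_one 0 _)

theorem pvBucket_mem (cs : List String) (k : Int) (c : Char) (j : Int) :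
    j ∈ pvBucket cs k c ↔
      (0 ≤ j ∧ j < cs.length) ∧ k < PySem.Str.len (PySem.List.pyGetD cs j "") ∧
      PySem.List.pyGetD (pvWord cs j) k ' ' = c := by
  unfold pvBucket pvWord
  rw [List.mem_filter, PySem.List.mem_pyRange_one]
  simp

theorem pvChar_mem_keys (cs : List String) (k : Int) {p : Int}
    (hp0 : 0 ≤ p) (hpn : p < cs.length)
    (hk : k < PySem.Str.len (PySem.List.pyGetD cs p "")) :
    PySem.List.pyGetD (pvWord cs p) k ' ' ∈ (pvBuckets cs k).keys := by
  rw [pvBuckets_keys, PySem.Set.mem_ofList]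
  refine List.mem_map.mpr ⟨(p, PySem.List.pyGetD cs p ""), ?_, rfl⟩
  unfold pvLk
  rw [PySem.List.enumerate_eq_map_pyRange cs ""]
  refine List.mem_filter.mpr ⟨?_, by simpa using hk⟩
  exact List.mem_map.mpr ⟨p, by simp [PySem.List.mem_pyRange_one, PySem.List.len]; omega, rfl⟩

theorem pvCountValues (cs : List String) (k : Int) (p q : Int)
    (hp0 : 0 ≤ p) (hpn : p < cs.length) (hq0 : 0 ≤ q) (hqn : q < cs.length)
    (hk : 0 ≤ k) :
    ((pvBuckets cs k).values.countP (fun b => decide ((p ∈ b) ∧ (q ∈ b))) : Int) =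
    if pvPb (pvWord cs p) (pvWord cs q) k.toNat then 1 else 0 := by
  have hlenp : PySem.Str.len (PySem.List.pyGetD cs p "") = ((pvWord cs p).length : Int) := by
    rw [PySem.Str.len_eq]; rfl
  have hlenq : PySem.Str.len (PySem.List.pyGetD cs q "") = ((pvWord cs q).length : Int) := by
    rw [PySem.Str.len_eq]; rfl
  rw [pvBuckets_values, List.countP_map]
  simp only [Function.comp_def]
  by_cases hP : k < ((pvWord cs p).length : Int) ∧ k < ((pvWord cs q).length : Int) ∧
      PySem.List.pyGetD (pvWord cs p) k ' ' = PySem.List.pyGetD (pvWord cs q) k ' '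
  · obtain ⟨hkp, hkq, hcc⟩ := hP
    have hcp : PySem.List.pyGetD (pvWord cs p) k ' ' = (pvWord cs p)[k.toNat] := by
      rw [PySem.List.pyGetD_eq_getElem _ ' ' hk (by omega)]
    have hcq : PySem.List.pyGetD (pvWord cs q) k ' ' = (pvWord cs q)[k.toNat] := by
      rw [PySem.List.pyGetD_eq_getElem _ ' ' hk (by omega)]
    have hpb : pvPb (pvWord cs p) (pvWord cs q) k.toNat = true := by
      unfold pvPb
      rw [List.getElem?_eq_getElem (by omega), List.getElem?_eq_getElem (by omega)]
      simp only [Bool.and_eq_true, decide_eq_true_eq]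
      exact ⟨⟨by omega, by omega⟩, by rw [← hcp, ← hcq]; exact_mod_cast congrArg _ hcc⟩
    rw [if_pos hpb]
    have hcongr : ∀ c ∈ (pvBuckets cs k).keys,
        ((fun c => decide ((p ∈ pvBucket cs k c) ∧ (q ∈ pvBucket cs k c))) c = true) ↔
        ((fun c => c == PySem.List.pyGetD (pvWord cs p) k ' ') c = true) := by
      intro c _
      simp only [decide_eq_true_eq, beq_iff_eq]
      constructor
      · rintro ⟨hpc, _⟩
        exact ((pvBucket_mem cs k c p).mp hpc).2.2.symm
      · rintro rfl
        refine ⟨(pvBucket_mem cs k _ p).mpr ⟨⟨hp0, hpn⟩, by omega, rfl⟩,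
                (pvBucket_mem cs k _ q).mpr ⟨⟨hq0, hqn⟩, by omega, hcc.symm⟩⟩
    rw [List.countP_congr hcongr]
    have : (pvBuckets cs k).keys.countP (fun c => c == PySem.List.pyGetD (pvWord cs p) k ' ') =
        (pvBuckets cs k).keys.count (PySem.List.pyGetD (pvWord cs p) k ' ') := rfl
    rw [this, List.count_eq_one_of_mem (pvBuckets_keys_nodup cs k)
        (pvChar_mem_keys cs k hp0 hpn (by omega))]
    rfl
  · have hpb : pvPb (pvWord cs p) (pvWord cs q) k.toNat = false := by
      unfold pvPb
      by_cases h1 : k.toNat < (pvWord cs p).length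
      · by_cases h2 : k.toNat < (pvWord cs q).length
        · have hcc : PySem.List.pyGetD (pvWord cs p) k ' ' ≠ PySem.List.pyGetD (pvWord cs q) k ' ' := by
            intro hc
            exact hP ⟨by omega, by omega, hc⟩
          rw [List.getElem?_eq_getElem h1, List.getElem?_eq_getElem h2]
          simp only [Bool.and_eq_false_iff, decide_eq_false_iff_not]
          right
          intro hsome
          apply hcc
          rw [PySem.List.pyGetD_eq_getElem _ ' ' hk (by omega),
              PySem.List.pyGetD_eq_getElem _ ' ' hk (by omega)]
          exact Option.some.inj hsome
        · simp [h2]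
      · simp [h1]
    rw [if_neg (by simp [hpb])]
    have : ((pvBuckets cs k).keys.countP
        (fun c => decide ((p ∈ pvBucket cs k c) ∧ (q ∈ pvBucket cs k c)))) = 0 := by
      rw [List.countP_eq_zero]
      intro c _
      simp only [decide_eq_true_eq]
      rintro ⟨hpc, hqc⟩
      obtain ⟨_, hkp, hcp⟩ := (pvBucket_mem cs k c p).mp hpc
      obtain ⟨_, hkq, hcq⟩ := (pvBucket_mem cs k c q).mp hqc
      exact hP ⟨by omega, by omega, hcp.trans hcq.symm⟩
    rw [this]
    rfl

def pvWidth (cs : List String) : Int :=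
  cs.foldl (fun m w => max m (PySem.Str.len w)) 0

theorem pvPerK (cs : List String) (k : Int) (hk : 0 ≤ k) (f : Int → Int → Int) :
    (pvBuckets cs k).values.foldl pvBucketLoop (pvMat cs.length f) =
    pvMat cs.length (fun p q => if p = q then f p q
      else f p q + (if pvPb (pvWord cs p) (pvWord cs q) k.toNat then 1 else 0)) := by
  have hb : ∀ b ∈ (pvBuckets cs k).values, b.Nodup ∧ ∀ x ∈ b, 0 ≤ x ∧ x < cs.length := by
    intro b hbv
    rw [pvBuckets_values] at hbv
    obtain ⟨c, _, rfl⟩ := List.mem_map.mp hbv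
    refine ⟨pvBucket_nodup cs k c, fun x hx => ?_⟩
    exact ((pvBucket_mem cs k c x).mp hx).1
  rw [pvBucketsFold _ hb f]
  apply pvMat_congr
  intro p q hp hq
  by_cases hpq : (p : Int) = (q : Int)
  · rw [if_pos hpq, if_pos hpq]
  · rw [if_neg hpq, if_neg hpq,
        pvCountValues cs k p q (by omega) (by omega) (by omega) (by omega) hk]

theorem pvKLoop (cs : List String) (d : Nat) : ∀ (k0 : Int) (f : Int → Int → Int), 0 ≤ k0 →
    (pvWidth cs - k0).toNat = d →
    (PySem.List.pyRange k0 (pvWidth cs) 1).foldl (fun m k =>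
      (pvBuckets cs k).values.foldl pvBucketLoop m) (pvMat cs.length f) =
    pvMat cs.length (fun p q => if p = q then f p q
      else f p q + ((PySem.List.pyRange k0 (pvWidth cs) 1).countP
        (fun k => pvPb (pvWord cs p) (pvWord cs q) k.toNat) : Int)) := by
  induction d with
  | zero =>
    intro k0 f hk0 hd
    rw [PySem.List.pyRange_one_eq_nil (by omega)]
    simp only [List.foldl_nil, List.countP_nil]
    apply pvMat_congr
    intro p q hp hq
    by_cases hpq : (p : Int) = (q : Int)
    · rw [if_pos hpq]
    · rw [if_neg hpq]; push_cast; ring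
  | succ d ih =>
    intro k0 f hk0 hd
    rw [PySem.List.pyRange_one_cons (by omega)]
    simp only [List.foldl_cons]
    rw [pvPerK cs k0 hk0 f]
    rw [ih (k0 + 1) _ (by omega) (by omega)]
    apply pvMat_congr
    intro p q hp hq
    by_cases hpq : (p : Int) = (q : Int)
    · rw [if_pos hpq, if_pos hpq, if_pos hpq]
    · rw [if_neg hpq, if_neg hpq, if_neg hpq, List.countP_cons]
      by_cases hb : pvPb (pvWord cs p) (pvWord cs q) k0.toNat = true
      · rw [if_pos hb, if_pos hb]
        push_cast; ring
      · rw [if_neg hb, if_neg hb]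
        push_cast; ring

-- ===== glue =====
theorem getDist_alt_eq (cs : List String) :
    getDist_alt cs =
    (PySem.List.pyRange 0 (pvWidth cs) 1).foldl (fun m k =>
      (pvBuckets cs k).values.foldl pvBucketLoop m)
      ((PySem.List.pyRange 0 (cs.length : Int) 1).map (fun i =>
        (PySem.List.pyRange 0 (cs.length : Int) 1).map (fun j => if i = j then (6 : Int) else 0))) := by
  rfl

theorem pvInitB (cs : List String) :
    (PySem.List.pyRange 0 (cs.length : Int) 1).map (fun i =>
      (PySem.List.pyRange 0 (cs.length : Int) 1).map (fun j => if i = j then (6 : Int) else 0)) =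
    pvMat cs.length (fun p q => if p = q then 6 else 0) := by
  rw [PySem.List.pyRange_zero_nat]
  simp only [List.map_map, Function.comp_def]
  rfl

theorem pvPb_false_of_min_le (u v : List Char) (k : Nat)
    (h : min u.length v.length ≤ k) : pvPb u v k = false := by
  unfold pvPb
  rcases min_le_iff.mp h with h1 | h1
  · simp only [Bool.and_eq_false_iff]
    left; left; simp; omega
  · simp only [Bool.and_eq_false_iff]
    left; right; simp; omega

theorem pvCountP_range_stable (u v : List Char) (a b : Nat)
    (ha : min u.length v.length ≤ a) (hab : a ≤ b) :
    (List.range b).countP (pvPb u v) = (List.range a).countP (pvPb u v) := by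
  induction b with
  | zero => have : a = 0 := by omega
            rw [this]
  | succ b ih =>
    by_cases hb : a = b + 1
    · rw [hb]
    · rw [List.range_succ, List.countP_append, ih (by omega), List.countP_singleton,
          pvPb_false_of_min_le u v b (by omega)]
      simp

theorem pvCnt_eq (cs : List String) (i j : Int) (W : Nat)
    (hmin : min (pvWord cs i).length (pvWord cs j).length ≤ W) :
    pvCnt cs i j = ((List.range W).countP (pvPb (pvWord cs i) (pvWord cs j)) : Int) := by
  unfold pvCnt
  rw [PySem.Str.len_eq, PySem.List.pyRange_zero_nat, List.foldl_map]
  have hfn : (fun (cnt : Int) (k : Nat) =>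
      if PySem.Str.pyGet? (PySem.List.pyGetD cs i "") (k : Int) =
         PySem.Str.pyGet? (PySem.List.pyGetD cs j "") (k : Int) then cnt + 1 else cnt) =
      (fun (cnt : Int) (k : Nat) =>
        if (fun k : Nat => decide ((pvWord cs i)[k]? = (pvWord cs j)[k]?)) k = true
        then cnt + 1 else cnt) := by
    funext cnt k
    refine if_congr ?_ rfl rfl
    simp only [PySem.Str.pyGet?_eq, PySem.Chars.pyGet?_eq_listPyGet?,
      PySem.List.pyGet?_natCast, decide_eq_true_eq]
    rfl
  rw [hfn, PySem.List.foldl_count_if, zero_add]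
  congr 1
  have h1 : (List.range (PySem.List.pyGetD cs i "").toList.length).countP
      (fun k : Nat => decide ((pvWord cs i)[k]? = (pvWord cs j)[k]?)) =
      (List.range (pvWord cs i).length).countP (pvPb (pvWord cs i) (pvWord cs j)) := by
    apply List.countP_congr
    intro k hk
    rw [List.mem_range] at hk
    have hk' : k < (pvWord cs i).length := hk
    simp only [decide_eq_true_eq]
    unfold pvPb
    by_cases h2 : k < (pvWord cs j).length
    · rw [List.getElem?_eq_getElem hk', List.getElem?_eq_getElem h2]
      simp only [Bool.and_eq_true, decide_eq_true_eq]
      constructor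
      · intro h; exact ⟨⟨hk', h2⟩, h⟩
      · rintro ⟨_, h⟩; exact h
    · rw [List.getElem?_eq_getElem hk', List.getElem?_eq_none (by omega)]
      simp only [Bool.and_eq_true, decide_eq_true_eq]
      constructor
      · intro h; exact absurd h (by simp)
      · rintro ⟨⟨_, h⟩, _⟩; omega
  rw [h1]
  rcases Nat.le_total (pvWord cs i).length W with hle | hle
  · rw [pvCountP_range_stable _ _ _ W (by omega) hle]
  · rw [pvCountP_range_stable _ _ _ (pvWord cs i).length (by omega) hle]

theorem pvPb_comm (u v : List Char) (k : Nat) : pvPb u v k = pvPb v u k := by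
  unfold pvPb
  by_cases h1 : k < u.length <;> by_cases h2 : k < v.length <;>
    simp [h1, h2, eq_comm]

theorem pvCountP_pyRange (u v : List Char) (W : Int) :
    ((PySem.List.pyRange 0 W 1).countP (fun k => pvPb u v k.toNat)) =
    (List.range W.toNat).countP (pvPb u v) := by
  rw [PySem.List.pyRange_zero, List.countP_map]
  exact List.countP_congr (fun k _ => by simp)

theorem pvWidth_spec (cs : List String) :
    0 ≤ pvWidth cs ∧ ∀ w ∈ cs, PySem.Str.len w ≤ pvWidth cs := by
  unfold pvWidth
  rw [show (fun (m : Int) (w : String) => max m (PySem.Str.len w)) =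
      (fun m w => max m ((PySem.Str.len) w)) from rfl]
  rw [← List.foldl_map (f := PySem.Str.len) (g := max)]
  obtain ⟨h1, h2⟩ := PySem.List.le_foldl_max (cs.map PySem.Str.len) 0
  exact ⟨h1, fun w hw => h2 _ (List.mem_map_of_mem hw)⟩

theorem pvLen_le_width (cs : List String) {i : Int} (hi0 : 0 ≤ i) (hin : i < cs.length) :
    ((pvWord cs i).length : Int) ≤ pvWidth cs := by
  have hmem : PySem.List.pyGetD cs i "" ∈ cs := by
    rw [PySem.List.pyGetD_eq_getElem cs "" hi0 (by omega)]
    exact List.getElem_mem _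
  have := (pvWidth_spec cs).2 _ hmem
  rw [PySem.Str.len_eq] at this
  exact this

theorem pv_main (cs : List String) : getDist cs = getDist_alt cs := by
  rw [getDist_mat, getDist_alt_eq, pvInitB,
      pvKLoop cs (pvWidth cs - 0).toNat 0 _ le_rfl rfl]
  apply pvMat_congr
  intro p q hp hq
  by_cases hpq : (p : Int) = (q : Int)
  · rw [if_pos hpq, if_pos hpq, if_pos hpq]
  · rw [if_neg hpq, if_neg hpq, if_neg hpq, zero_add]
    have hW : ((PySem.List.pyRange 0 (pvWidth cs) 1).countP
        (fun k => pvPb (pvWord cs p) (pvWord cs q) k.toNat) : Int) =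
        ((List.range (pvWidth cs).toNat).countP (pvPb (pvWord cs p) (pvWord cs q)) : Int) := by
      rw [pvCountP_pyRange (pvWord cs p) (pvWord cs q) (pvWidth cs)]
    rw [hW]
    have hlp : ((pvWord cs p).length : Int) ≤ pvWidth cs := pvLen_le_width cs (by omega) (by omega)
    have hlq : ((pvWord cs q).length : Int) ≤ pvWidth cs := pvLen_le_width cs (by omega) (by omega)
    rcases Int.le_total (p : Int) (q : Int) with hle | hle
    · have hmn : min (p : Int) (q : Int) = (p : Int) := by omega
      have hmx : max (p : Int) (q : Int) = (q : Int) := by omega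
      rw [hmn, hmx, pvCnt_eq cs p q (pvWidth cs).toNat (by omega)]
    · have hmn : min (p : Int) (q : Int) = (q : Int) := by omega
      have hmx : max (p : Int) (q : Int) = (p : Int) := by omega
      rw [hmn, hmx, pvCnt_eq cs q p (pvWidth cs).toNat (by omega)]
      congr 1
      exact List.countP_congr (fun k _ => by rw [pvPb_comm])

-- ===== VERDICT (by name: the statement is the Claim_ definition above) =====
theorem getDist_spec : Claim_equal_getDist := by
  intro cs _ _
  unfold Spec_getDist
  exact pv_main cs
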